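-- pv_equiv track=rewrite | github.com/aaudiber/Alosapien | TeamMaker.py | indOfWeakest
-- ===== SOURCE A (Python) =====
-- players={'Drew':1450,'JZ':900,'Mike':950,'Alo':650,'Arno':800,'Will':750,'Jind':550,'Wang':400,'JsnH':600,'Gun':700,'Danl':750} #scores of players
--
-- def indOfWeakest(Teams):
--     indW=0
--     weakestSum=TeamSum(Teams[0])
--     for ind in range(len(Teams)):
--         if weakestSum>TeamSum(Teams[ind]):
--             indW=ind
--             weakestSum=TeamSum(Teams[ind])
--     return indW
--
-- def TeamSum(Team):
--     Sum=0
--     for player in Team: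
--         Sum+=players[player]
--     return Sum
-- ===== SOURCE B (Python) =====
-- players={'Drew':1450,'JZ':900,'Mike':950,'Alo':650,'Arno':800,'Will':750,'Jind':550,'Wang':400,'JsnH':600,'Gun':700,'Danl':750} #scores of players
--
-- def TeamSum(Team):
--     Sum=0
--     for player in Team:
--         Sum+=players[player]
--     return Sum
--
-- def indOfWeakest(Teams):
--     sums = [TeamSum(t) for t in Teams]
--     return sums.index(min(sums))
-- ===== Notes on version B (the rewrite author's own statement) =====
-- stated objective: simpler
-- what changed: A's fused scan that tracks the weakest index and sum while looping over indices is replaced by building the list of team sums once and returning sums.index(min(sums)).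
import Mathlib
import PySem

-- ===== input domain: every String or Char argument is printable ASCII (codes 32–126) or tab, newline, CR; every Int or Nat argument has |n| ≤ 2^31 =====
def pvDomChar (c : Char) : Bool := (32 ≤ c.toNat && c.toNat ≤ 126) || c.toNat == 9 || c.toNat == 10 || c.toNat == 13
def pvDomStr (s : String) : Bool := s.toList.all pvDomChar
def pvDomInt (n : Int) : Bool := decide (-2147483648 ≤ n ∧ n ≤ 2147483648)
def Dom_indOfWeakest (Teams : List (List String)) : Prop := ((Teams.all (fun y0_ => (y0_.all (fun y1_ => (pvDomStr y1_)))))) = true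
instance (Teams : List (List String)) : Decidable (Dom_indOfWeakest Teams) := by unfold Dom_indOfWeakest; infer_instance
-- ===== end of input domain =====

-- B builds the list of team sums once and returns sums.index(min(sums)); A fuses the
-- min-tracking into one indexed scan re-evaluating TeamSum. Equivalence of return values.

-- the module-level 'players' dict (data shared by both ports)
def playersDict : PySem.Dict String Int :=
  PySem.Dict.ofList
  [("Drew", 1450), ("JZ", 900), ("Mike", 950), ("Alo", 650), ("Arno", 800), ("Will", 750),
   ("Jind", 550), ("Wang", 400), ("JsnH", 600), ("Gun", 700), ("Danl", 750)]

-- ===== PORT A =====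
-- TeamSum as A uses it; Pre_ guarantees every player is a key, so getD never takes its default
def teamSumA (Team : List String) : Int :=
  Team.foldl (fun Sum player => Sum + PySem.Dict.getD playersDict player 0) 0

def indOfWeakest (Teams : List (List String)) : Int :=
  -- Teams[0] raises IndexError on []; Pre_ excludes that, so the default [] is never taken
  let weakestSum0 := teamSumA (PySem.List.pyGetD Teams 0 [])
  let st := (PySem.List.pyRange 0 (Teams.length : Int) 1).foldl
    (fun (st : Int × Int) ind =>
      let ts := teamSumA (PySem.List.pyGetD Teams ind [])
      if st.2 > ts then (ind, ts) else st) ((0 : Int), weakestSum0)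
  st.1

-- ===== PORT B =====
def teamSumB (Team : List String) : Int :=
  Team.foldl (fun Sum player => Sum + PySem.Dict.getD playersDict player 0) 0

def indOfWeakest_alt (Teams : List (List String)) : Int :=
  let sums := Teams.map teamSumB
  match PySem.List.min? sums (fun y => y) with
  | none => 0           -- unreachable under Pre_: min([]) raises ValueError
  | some m => ((PySem.List.index? sums m).getD 0 : Int)

-- ===== PRECONDITION & SPEC =====
-- Pre_ excludes exactly the inputs on which A raises: the empty list (IndexError on Teams[0])
-- and teams containing a name that is not a key of 'players' (KeyError in TeamSum).
def Pre_indOfWeakest (Teams : List (List String)) : Prop :=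
  Teams ≠ [] ∧ Teams.all (fun t => t.all (fun p => (PySem.Dict.get? playersDict p).isSome)) = true
instance (Teams : List (List String)) : Decidable (Pre_indOfWeakest Teams) := by
  unfold Pre_indOfWeakest; infer_instance
def pvWitness_indOfWeakest : List (List String) := [["Drew", "Wang"], ["Alo"], []]

def Spec_indOfWeakest (Teams : List (List String)) (out : Int) : Prop := out = indOfWeakest_alt Teams
instance (Teams : List (List String)) (out : Int) : Decidable (Spec_indOfWeakest Teams out) := by unfold Spec_indOfWeakest; infer_instance

-- ===== CLAIM (what is proved, stated in full; the proofs are below) =====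
def Claim_equal_indOfWeakest : Prop := ∀ (Teams : List (List String)), Dom_indOfWeakest Teams → Pre_indOfWeakest Teams → Spec_indOfWeakest Teams (indOfWeakest Teams)

-- ===== LEMMAS AND PROOFS =====

-- running minimum of a nonempty list, as min?/min compute it
def minL (xs : List Int) : Int :=
  match xs with
  | [] => 0
  | s :: t => t.foldl min s

lemma minL_le (xs : List Int) (y : Int) (hy : y ∈ xs) : minL xs ≤ y := by
  cases xs with
  | nil => cases hy
  | cons s t =>
    rcases List.mem_cons.mp hy with h | h
    · subst h; exact (PySem.List.foldl_min_le t y).1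
    · exact (PySem.List.foldl_min_le t s).2 y h

lemma minL_mem (xs : List Int) (h : xs ≠ []) : minL xs ∈ xs := by
  cases xs with
  | nil => exact absurd rfl h
  | cons s t =>
    rcases PySem.List.foldl_min_mem t s with h | h
    · simp [minL, h]
    · simp [minL, List.mem_cons, h]

lemma minL_append (xs : List Int) (x : Int) (h : xs ≠ []) :
    minL (xs ++ [x]) = min (minL xs) x := by
  cases xs with
  | nil => exact absurd rfl h
  | cons s t => simp [minL, List.foldl_append]

def stepA (st : Int × Int) (p : Int × Int) : Int × Int :=
  if st.2 > p.2 then (p.1, p.2) else st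

-- the fused loop over enumerated sums computes (first index of the minimum, the minimum)
lemma loop_min (xs : List Int) (h : xs ≠ []) :
    (PySem.List.enumerate xs 0).foldl stepA ((0 : Int), xs.headD 0) =
      ((((PySem.List.index? xs (minL xs)).getD 0 : Nat) : Int), minL xs) := by
  induction xs using List.reverseRecOn with
  | nil => exact absurd rfl h
  | append_singleton xs x ih =>
    cases hxs : xs with
    | nil =>
      subst hxs
      simp [PySem.List.enumerate, stepA, minL, PySem.List.index?]
    | cons s t =>
      have hne : xs ≠ [] := by simp [hxs]
      rw [← hxs]
      have hhead : (xs ++ [x]).headD 0 = xs.headD 0 := by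
        cases xs with
        | nil => simp at hne
        | cons a l => simp
      rw [PySem.List.enumerate_append, List.foldl_append, hhead, ih hne]
      rw [minL_append xs x hne]
      by_cases hlt : x < minL xs
      · have hmin : min (minL xs) x = x := min_eq_right hlt.le
        have hnotmem : x ∉ xs := fun hmem => absurd (minL_le xs x hmem) (not_le.mpr hlt)
        rw [hmin, PySem.List.index?_append_singleton_self xs x hnotmem]
        simp [stepA, PySem.List.enumerate, hlt]
      · have hle : minL xs ≤ x := not_lt.mp hlt
        have hmin : min (minL xs) x = minL xs := min_eq_left hle
        rw [hmin, PySem.List.index?_append_of_mem [x] (minL_mem xs hne)]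
        simp [stepA, PySem.List.enumerate, not_lt.mpr hle]

lemma teamSum_eq : teamSumA = teamSumB := rfl

lemma pyGetD_teamSum (Teams : List (List String)) (i : Int) :
    teamSumB (PySem.List.pyGetD Teams i []) =
      PySem.List.pyGetD (Teams.map teamSumB) i 0 := by
  have : (0 : Int) = teamSumB [] := rfl
  rw [this, PySem.List.pyGetD_map]

-- ===== VERDICT (by name: the statement is the Claim_ definition above) =====
theorem indOfWeakest_spec : Claim_equal_indOfWeakest := by
  intro Teams _ hpre
  unfold Spec_indOfWeakest indOfWeakest indOfWeakest_alt
  obtain ⟨hne, -⟩ := hpre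
  set sums : List Int := Teams.map teamSumB with hsums
  have hsne : sums ≠ [] := by simpa [hsums] using hne
  obtain ⟨a, l, hal⟩ := List.exists_cons_of_ne_nil hsne
  have hlen : (Teams.length : Int) = (sums.length : Int) := by simp [hsums]
  have hbody : ∀ (st : Int × Int) (ind : Int),
      (let ts := teamSumA (PySem.List.pyGetD Teams ind []);
       if st.2 > ts then (ind, ts) else st) =
        stepA st (ind, PySem.List.pyGetD sums ind 0) := by
    intro st ind
    simp only [teamSum_eq, pyGetD_teamSum, stepA, hsums]
  have hinit : teamSumA (PySem.List.pyGetD Teams 0 []) = sums.headD 0 := by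
    rw [teamSum_eq, pyGetD_teamSum, ← hsums, hal]
    simp [PySem.List.pyGetD, PySem.List.pyGet?, PySem.List.pyIdx?]
  simp only [hbody, hinit, hlen]
  have henum := PySem.List.enumerate_eq_map_pyRange (xs := sums) (d := 0)
  simp only [PySem.List.len_eq] at henum
  rw [show ((PySem.List.pyRange 0 (sums.length : Int) 1).foldl
        (fun st ind => stepA st (ind, PySem.List.pyGetD sums ind 0)) ((0 : Int), sums.headD 0))
      = (PySem.List.enumerate sums 0).foldl stepA ((0 : Int), sums.headD 0) by
    rw [henum, List.foldl_map]]
  rw [loop_min sums hsne]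
  rw [hal, PySem.List.min?_id_cons]
  simp [minL]
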